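-- pv_equiv track=rewrite | github.com/Bccccccs/MyCatcher | input_generator.py | split_cases_from_text
-- ===== SOURCE A (Python) =====
-- def split_cases_from_text(text: str) -> list[str]:
--     """
--     Split multiple test inputs from LLM text.
--     Convention: blank line separates cases.
--     """
--     lines = (text or "").splitlines()
--     cases = []
--     buf = []
--     for ln in lines:
--         if ln.strip() == "":
--             if buf:
--                 cases.append("\n".join(buf).strip() + "\n")
--                 buf = []
--         else:
--             buf.append(ln.rstrip("\n"))
--     if buf:
--         cases.append("\n".join(buf).strip() + "\n")
--
--     # remove empty/garbage
--     cases = [c for c in cases if c.strip()]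
--     return cases
-- ===== SOURCE B (Python) =====
-- def split_cases_from_text(text: str) -> list[str]:
--     """
--     Split multiple test inputs from LLM text.
--     Convention: blank line separates cases.
--     """
--     lines = (text or "").splitlines()
--     cases = []
--     i, n = 0, len(lines)
--     while i < n:
--         if lines[i].strip():
--             j = i
--             while j < n and lines[j].strip():
--                 j += 1
--             cases.append("\n".join(lines[i:j]).strip() + "\n")
--             i = j
--         else:
--             i += 1
--     return cases
-- ===== Notes on version B (the rewrite author's own statement) =====
-- stated objective: simpler
-- what changed: A's buffer-and-flush accumulator loop with a post-loop flush and a final garbage filter is replaced by a run scanner that skips blank lines and emits each maximal non-blank run directly (the filter and the rstrip are provably no-ops).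
import Mathlib
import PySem

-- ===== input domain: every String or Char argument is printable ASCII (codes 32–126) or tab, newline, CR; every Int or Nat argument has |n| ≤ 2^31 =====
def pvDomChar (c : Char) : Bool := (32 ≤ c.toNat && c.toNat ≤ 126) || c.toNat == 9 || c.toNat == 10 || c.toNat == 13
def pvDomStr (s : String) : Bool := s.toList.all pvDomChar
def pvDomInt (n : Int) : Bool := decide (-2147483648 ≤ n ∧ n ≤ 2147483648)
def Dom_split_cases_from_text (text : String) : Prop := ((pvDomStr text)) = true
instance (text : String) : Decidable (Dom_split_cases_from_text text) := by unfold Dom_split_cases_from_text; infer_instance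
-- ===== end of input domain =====

-- B replaces A's buffer-and-flush accumulator loop (plus its flush after the loop and the final
-- garbage filter) by a run scanner over the same splitlines list; objective: simpler.

-- ===== PORT A =====
-- exact hand port of ln.rstrip("\n"): drop trailing '\n' characters
def pyRstripNl (s : String) : String :=
  String.ofList ((s.toList.reverse.dropWhile (fun c => c == '\n')).reverse)

def split_cases_from_text (text : String) : List String :=
  let lines := PySem.Str.splitlines (if text == "" then "" else text)
  let st := lines.foldl (fun (st : List String × List String) ln =>
      if PySem.Str.strip ln == "" then
        if st.2 ≠ [] then
          (st.1 ++ [PySem.Str.strip (PySem.Str.join "\n" st.2) ++ "\n"], [])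
        else st
      else (st.1, st.2 ++ [pyRstripNl ln])) ([], [])
  let cases := if st.2 ≠ [] then
      st.1 ++ [PySem.Str.strip (PySem.Str.join "\n" st.2) ++ "\n"]
    else st.1
  cases.filter (fun c => !(PySem.Str.strip c == ""))

-- ===== PORT B =====
def pvNonblank (ln : String) : Bool := !(PySem.Str.strip ln == "")

-- run scanner: skip blank lines, otherwise emit the maximal non-blank run and continue after it
def pvScan (lines : List String) : List String :=
  match lines with
  | [] => []
  | ln :: rest =>
    if h : pvNonblank ln then
      (PySem.Str.strip (PySem.Str.join "\n" ((ln :: rest).takeWhile pvNonblank)) ++ "\n")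
        :: pvScan ((ln :: rest).dropWhile pvNonblank)
    else pvScan rest
termination_by lines.length
decreasing_by
  · simp only [List.dropWhile_cons, h, if_true]
    exact Nat.lt_succ_of_le (List.length_dropWhile_le _ _)
  · simp

def split_cases_from_text_alt (text : String) : List String :=
  pvScan (PySem.Str.splitlines (if text == "" then "" else text))

-- ===== PRECONDITION & SPEC =====
def Spec_split_cases_from_text (text : String) (out : List String) : Prop := out = split_cases_from_text_alt text
instance (text : String) (out : List String) : Decidable (Spec_split_cases_from_text text out) := by unfold Spec_split_cases_from_text; infer_instance

-- ===== CLAIM (what is proved, stated in full; the proofs are below) =====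
def Claim_equal_split_cases_from_text : Prop := ∀ (text : String), Dom_split_cases_from_text text → Spec_split_cases_from_text text (split_cases_from_text text)

-- ===== LEMMAS AND PROOFS =====

-- proof-side helpers
def pvEmit (buf : List String) : String :=
  PySem.Str.strip (PySem.Str.join "\n" buf) ++ "\n"

def pvStepA (st : List String × List String) (ln : String) : List String × List String :=
  if PySem.Str.strip ln == "" then
    if st.2 ≠ [] then (st.1 ++ [pvEmit st.2], []) else st
  else (st.1, st.2 ++ [pyRstripNl ln])

def pvFinA (st : List String × List String) : List String :=
  if st.2 ≠ [] then st.1 ++ [pvEmit st.2] else st.1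

-- the tail of A's loop: the cases still to be emitted, given the current buffer
def pvGo2 : List String → List String → List String
  | buf, [] => if buf ≠ [] then [pvEmit buf] else []
  | buf, ln :: rest =>
    if PySem.Str.strip ln == "" then
      (if buf ≠ [] then [pvEmit buf] else []) ++ pvGo2 [] rest
    else pvGo2 (buf ++ [pyRstripNl ln]) rest

theorem pv_isspace_nl : PySem.Chars.isspace '\n' = true := by decide

theorem pv_mem_dropWhile {p : Char → Bool} {l : List Char} {c : Char}
    (hc : c ∈ l) (hp : p c = false) : c ∈ l.dropWhile p := by
  induction l with
  | nil => simp at hc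
  | cons a t ih =>
    by_cases ha : p a = true
    · rw [List.dropWhile_cons_of_pos ha]
      rcases List.mem_cons.mp hc with h | h
      · subst h; rw [hp] at ha; cases ha
      · exact ih h
    · rw [List.dropWhile_cons_of_neg ha]; exact hc

theorem pv_rstrip_eq_nil_iff (l : List Char) :
    PySem.Chars.rstrip l = [] ↔ ∀ c ∈ l, PySem.Chars.isspace c = true := by
  simp [PySem.Chars.rstrip, List.dropWhile_eq_nil_iff]

theorem pv_strip_ne_nil {l : List Char} {c : Char}
    (hc : c ∈ l) (hs : PySem.Chars.isspace c = false) : PySem.Chars.strip l ≠ [] := by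
  rw [PySem.Chars.strip, Ne, pv_rstrip_eq_nil_iff]
  intro h
  have : c ∈ PySem.Chars.lstrip l := pv_mem_dropWhile hc hs
  have := h c this
  rw [hs] at this; cases this

theorem pv_rstrip_append_space {l : List Char} {c : Char}
    (h : PySem.Chars.isspace c = true) :
    PySem.Chars.rstrip (l ++ [c]) = PySem.Chars.rstrip l := by
  simp [PySem.Chars.rstrip, h]

theorem pv_rstrip_idem (l : List Char) :
    PySem.Chars.rstrip (PySem.Chars.rstrip l) = PySem.Chars.rstrip l := by
  simp [PySem.Chars.rstrip, List.dropWhile_idempotent]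

theorem pv_strip_append_space {l : List Char} {c : Char}
    (h : PySem.Chars.isspace c = true) :
    PySem.Chars.strip (l ++ [c]) = PySem.Chars.strip l := by
  rw [PySem.Chars.strip, PySem.Chars.strip]
  by_cases hl : PySem.Chars.lstrip l = []
  · have hall : ∀ d ∈ l, PySem.Chars.isspace d = true := by
      simpa [PySem.Chars.lstrip, List.dropWhile_eq_nil_iff] using hl
    have : PySem.Chars.lstrip (l ++ [c]) = [] := by
      simp [PySem.Chars.lstrip, List.dropWhile_eq_nil_iff]
      intro d hd
      rcases hd with h' | h'
      · exact hall d h'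
      · subst h'; exact h
    rw [this, hl]
  · have : PySem.Chars.lstrip (l ++ [c]) = PySem.Chars.lstrip l ++ [c] := by
      rw [PySem.Chars.lstrip, PySem.Chars.lstrip] at *
      rw [List.dropWhile_append]
      simp [List.isEmpty_iff, hl]
    rw [this, pv_rstrip_append_space h]

-- head of lstrip is nonspace, so strip is a fixed point of lstrip
theorem pv_lstrip_strip (l : List Char) :
    PySem.Chars.lstrip (PySem.Chars.strip l) = PySem.Chars.strip l := by
  by_cases h0 : PySem.Chars.strip l = []
  · rw [h0]; rfl
  · obtain ⟨u, hu⟩ : (PySem.Chars.strip l).reverse <:+ (PySem.Chars.lstrip l).reverse := by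
      simpa [PySem.Chars.strip, PySem.Chars.rstrip] using
        List.dropWhile_suffix (l := (PySem.Chars.lstrip l).reverse) PySem.Chars.isspace
    have hpre : PySem.Chars.strip l ++ u.reverse = PySem.Chars.lstrip l := by
      have := congrArg List.reverse hu
      simpa [List.reverse_append] using this
    cases hs : PySem.Chars.strip l with
    | nil => exact absurd hs h0
    | cons a t =>
      have hlst : PySem.Chars.lstrip l = a :: (t ++ u.reverse) := by
        rw [← hpre, hs]; simp
      have hne : (PySem.Chars.lstrip l) ≠ [] := by rw [hlst]; simp
      have hhead : PySem.Chars.isspace ((PySem.Chars.lstrip l).head hne) = false :=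
        List.head_dropWhile_not _ _
      have heq : (PySem.Chars.lstrip l).head hne = a := by simp [hlst]
      have ha : PySem.Chars.isspace a = false := heq ▸ hhead
      simp [PySem.Chars.lstrip, List.dropWhile_cons_of_neg, ha]

theorem pv_strip_idem (l : List Char) :
    PySem.Chars.strip (PySem.Chars.strip l) = PySem.Chars.strip l := by
  rw [show PySem.Chars.strip (PySem.Chars.strip l)
        = PySem.Chars.rstrip (PySem.Chars.lstrip (PySem.Chars.strip l)) from rfl,
     pv_lstrip_strip, PySem.Chars.strip, pv_rstrip_idem]

theorem pv_strip_emit (l : List Char) :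
    PySem.Chars.strip (PySem.Chars.strip l ++ ['\n']) = PySem.Chars.strip l := by
  rw [pv_strip_append_space pv_isspace_nl, pv_strip_idem]

theorem pv_mem_intercalate {sep x : List Char} {xs : List (List Char)} {c : Char}
    (h : c ∈ x) : c ∈ sep.intercalate (x :: xs) := by
  rw [List.intercalate]
  cases xs with
  | nil => simpa using h
  | cons y zs => simp [List.intersperse, h]

theorem pv_go_no_nl (isB : Char → Bool) (h : isB '\n' = true) :
    ∀ s cur acc, '\n' ∉ cur → (∀ a ∈ acc, '\n' ∉ a) →
      ∀ l ∈ PySem.Chars.splitlines.go isB s cur acc, '\n' ∉ l := by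
  intro s cur acc
  fun_induction PySem.Chars.splitlines.go isB s cur acc with
  | case1 cur acc hemp => intro h1 h2 l hl
                          simp only [List.mem_reverse] at hl; exact h2 _ hl
  | case2 cur acc hemp => intro h1 h2 l hl
                          simp only [List.mem_reverse, List.mem_cons] at hl
                          rcases hl with h' | h'
                          · subst h'; simpa using h1
                          · exact h2 _ h'
  | case3 rest cur acc ih => intro h1 h2 l hl
                             exact ih (by simp) (by intro a ha
                                                    simp only [List.mem_cons] at ha
                                                    rcases ha with h' | h'
                                                    · subst h'; simpa using h1
                                                    · exact h2 _ h') l hl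
  | case4 c rest cur acc hne hB ih => intro h1 h2 l hl
                                      exact ih (by simp) (by intro a ha
                                                             simp only [List.mem_cons] at ha
                                                             rcases ha with h' | h'
                                                             · subst h'; simpa using h1
                                                             · exact h2 _ h') l hl
  | case5 c rest cur acc hne hB ih => intro h1 h2 l hl
                                      refine ih ?_ h2 l hl
                                      intro hc
                                      simp only [List.mem_cons] at hc
                                      rcases hc with h' | h'
                                      · exact hB (h' ▸ h)
                                      · exact h1 h'

theorem pv_no_nl_splitlines (s : String) :
    ∀ l ∈ PySem.Str.splitlines s, '\n' ∉ l.toList := by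
  intro l hl
  rw [PySem.Str.splitlines] at hl
  obtain ⟨cl, hcl, rfl⟩ := List.mem_map.mp hl
  rw [PySem.Chars.splitlines] at hcl
  have := pv_go_no_nl _ (by decide) s.toList [] [] (by simp) (by simp) cl hcl
  simpa using this

theorem pv_rstripNl_id {s : String} (h : '\n' ∉ s.toList) : pyRstripNl s = s := by
  rw [pyRstripNl, ← String.toList_inj]
  simp only [String.toList_ofList]
  rw [List.dropWhile_eq_self_iff.mpr, List.reverse_reverse]
  intro hl
  have hm : s.toList.reverse[0] ∈ s.toList := by
    rw [← List.mem_reverse]; exact List.getElem_mem hl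
  intro he
  exact h ((beq_iff_eq.mp he) ▸ hm)

theorem pv_ofList_eq_empty_iff (l : List Char) : String.ofList l = "" ↔ l = [] := by
  rw [← String.toList_inj]; simp

theorem pv_nonblank_iff (s : String) :
    pvNonblank s = true ↔ PySem.Chars.strip s.toList ≠ [] := by
  rw [pvNonblank, PySem.Str.strip]
  simp [pv_ofList_eq_empty_iff]

theorem pv_strip_nil_of_all {l : List Char}
    (h : ∀ c ∈ l, PySem.Chars.isspace c = true) : PySem.Chars.strip l = [] := by
  have h' : PySem.Chars.lstrip l = [] := by
    simp [PySem.Chars.lstrip, List.dropWhile_eq_nil_iff]; exact h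
  rw [PySem.Chars.strip, h']; rfl

theorem pv_emit_toList (buf : List String) :
    (pvEmit buf).toList =
      PySem.Chars.strip (PySem.Chars.join "\n".toList (buf.map String.toList)) ++ ['\n'] := by
  simp [pvEmit, PySem.Str.strip, PySem.Str.join]

theorem pv_nonblank_emit {b : String} {bs : List String} (hb : pvNonblank b = true) :
    pvNonblank (pvEmit (b :: bs)) = true := by
  rw [pv_nonblank_iff, pv_emit_toList]
  have hj : ∃ c ∈ PySem.Chars.join "\n".toList ((b :: bs).map String.toList),
      PySem.Chars.isspace c = false := by
    have hb' := (pv_nonblank_iff b).mp hb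
    by_contra hall
    push_neg at hall
    exact hb' (pv_strip_nil_of_all (fun c hc => by
      have := hall c (by
        rw [PySem.Chars.join]
        exact pv_mem_intercalate (x := b.toList) (xs := bs.map String.toList) hc)
      simpa using this))
  obtain ⟨c, hc, hcs⟩ := hj
  have hne : PySem.Chars.strip (PySem.Chars.join "\n".toList ((b :: bs).map String.toList)) ≠ [] :=
    pv_strip_ne_nil hc hcs
  rw [pv_strip_emit]
  exact hne

theorem pv_fold (lines : List String) : ∀ (cases buf : List String),
    pvFinA (List.foldl pvStepA (cases, buf) lines) = cases ++ pvGo2 buf lines := by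
  induction lines with
  | nil => intro cases buf
           by_cases h : buf = [] <;> simp [pvGo2, pvFinA, h]
  | cons ln rest ih =>
    intro cases buf
    rw [List.foldl_cons]
    by_cases h : (PySem.Str.strip ln == "") = true
    · by_cases hb : buf = []
      · subst hb
        rw [show pvStepA (cases, []) ln = (cases, []) by simp [pvStepA, h]]
        rw [ih cases []]
        simp [pvGo2, h]
      · rw [show pvStepA (cases, buf) ln = (cases ++ [pvEmit buf], []) by
              simp [pvStepA, h, hb]]
        rw [ih (cases ++ [pvEmit buf]) []]
        simp [pvGo2, h, hb]
    · rw [show pvStepA (cases, buf) ln = (cases, buf ++ [pyRstripNl ln]) by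
            simp [pvStepA, h]]
      rw [ih cases (buf ++ [pyRstripNl ln])]
      simp [pvGo2, h]

theorem pv_main : ∀ (n : Nat) (lines : List String), lines.length ≤ n →
    (∀ l ∈ lines, '\n' ∉ l.toList) →
    (List.filter (fun c => !(PySem.Str.strip c == "")) (pvGo2 [] lines) = pvScan lines) ∧
    (∀ buf, buf ≠ [] → (∀ b ∈ buf, pvNonblank b = true) →
       List.filter (fun c => !(PySem.Str.strip c == "")) (pvGo2 buf lines) =
         pvEmit (buf ++ lines.takeWhile pvNonblank) :: pvScan (lines.dropWhile pvNonblank)) := by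
  intro n
  induction n with
  | zero =>
    intro lines hlen hok
    have : lines = [] := List.length_eq_zero_iff.mp (Nat.le_zero.mp hlen)
    subst this
    refine ⟨by simp [pvGo2, pvScan], ?_⟩
    intro buf hbuf hnb
    obtain ⟨b, bs, rfl⟩ := List.exists_cons_of_ne_nil hbuf
    have hemit := pv_nonblank_emit (bs := bs) (hnb b (by simp))
    rw [pvNonblank] at hemit
    simp [pvGo2, pvScan, List.filter, hemit]
  | succ n ihn =>
    intro lines hlen hok
    cases lines with
    | nil =>
      refine ⟨by simp [pvGo2, pvScan], ?_⟩
      intro buf hbuf hnb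
      obtain ⟨b, bs, rfl⟩ := List.exists_cons_of_ne_nil hbuf
      have hemit := pv_nonblank_emit (bs := bs) (hnb b (by simp))
      rw [pvNonblank] at hemit
      simp [pvGo2, pvScan, List.filter, hemit]
    | cons ln rest =>
      have hlen' : rest.length ≤ n := by simpa using hlen
      have hok' : ∀ l ∈ rest, '\n' ∉ l.toList := fun l hl => hok l (by simp [hl])
      have hln : '\n' ∉ ln.toList := hok ln (by simp)
      obtain ⟨ih1, ih2⟩ := ihn rest hlen' hok'
      by_cases hb : pvNonblank ln = true
      · -- non-blank first line
        have hbs : (PySem.Str.strip ln == "") = false := by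
          rw [pvNonblank] at hb; simpa using hb
        constructor
        · rw [show pvGo2 [] (ln :: rest) = pvGo2 [pyRstripNl ln] rest by simp [pvGo2, hbs]]
          rw [pv_rstripNl_id hln]
          rw [ih2 [ln] (by simp) (by simpa using hb)]
          rw [pvScan]
          simp [pvEmit, hb]
        · intro buf hbuf hnb
          rw [show pvGo2 buf (ln :: rest) = pvGo2 (buf ++ [pyRstripNl ln]) rest by
                simp [pvGo2, hbs]]
          rw [pv_rstripNl_id hln]
          rw [ih2 (buf ++ [ln]) (by simp) (by
                intro b hbm
                rcases List.mem_append.mp hbm with h' | h'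
                · exact hnb b h'
                · simp at h'; subst h'; exact hb)]
          simp [hb]
      · -- blank first line
        have hbs : (PySem.Str.strip ln == "") = true := by
          rw [pvNonblank] at hb; simpa using hb
        have hscan : pvScan (ln :: rest) = pvScan rest := by
          rw [pvScan]; simp [hb]
        constructor
        · rw [show pvGo2 [] (ln :: rest) = [] ++ pvGo2 [] rest by simp [pvGo2, hbs]]
          simpa [hscan] using ih1
        · intro buf hbuf hnb
          rw [show pvGo2 buf (ln :: rest) = [pvEmit buf] ++ pvGo2 [] rest by
                simp [pvGo2, hbs, hbuf]]
          rw [List.filter_append, ih1]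
          obtain ⟨b, bs, rfl⟩ := List.exists_cons_of_ne_nil hbuf
          have hemit := pv_nonblank_emit (bs := bs) (hnb b (by simp))
          rw [pvNonblank] at hemit
          have hbF : pvNonblank ln = false := by simpa using hb
          simp [List.filter, hemit, hbF, hscan]

-- ===== VERDICT (by name: the statement is the Claim_ definition above) =====
theorem split_cases_from_text_spec : Claim_equal_split_cases_from_text := by
  intro text _
  show List.filter (fun c => !(PySem.Str.strip c == ""))
      (pvFinA (List.foldl pvStepA ([], [])
        (PySem.Str.splitlines (if text == "" then "" else text))))
    = pvScan (PySem.Str.splitlines (if text == "" then "" else text))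
  rw [pv_fold]
  rw [List.nil_append]
  exact (pv_main _ _ (le_refl _) (pv_no_nl_splitlines _)).1
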